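-- pv_equiv track=rewrite | github.com/dzhao14/HackerRank_code | practice/algorithms/DP/equal.py | solution
-- ===== SOURCE A (Python) =====
-- def moves(i, m):
--     diff = i - m
--     count = 0
--     while diff > 0:
--         if diff >= 5:
--             count += 1
--             diff -= 5
--         elif diff >= 2:
--             count += 1
--             diff -= 2
--         else:
--             count += 1
--             diff -= 1
--     return count
--
-- def solution(arr):
--     count = 0
--     m = min(arr)
--     for i in arr:
--         if i == m:
--             pass
--         else:
--             count += moves(i, m)
--     return count
-- ===== SOURCE B (Python) =====
-- def solution(arr):
--     m = min(arr)
--     total = 0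
--     for i in arr:
--         d = i - m
--         total += d // 5 + (d % 5) // 2 + (d % 5) % 2
--     return total
-- ===== Notes on version B (the rewrite author's own statement) =====
-- stated objective: faster
-- what changed: Replaces the per-element greedy subtraction loop (one iteration per move) with the closed form d//5 + (d%5)//2 + (d%5)%2, making the cost independent of the element values.
import Mathlib
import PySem

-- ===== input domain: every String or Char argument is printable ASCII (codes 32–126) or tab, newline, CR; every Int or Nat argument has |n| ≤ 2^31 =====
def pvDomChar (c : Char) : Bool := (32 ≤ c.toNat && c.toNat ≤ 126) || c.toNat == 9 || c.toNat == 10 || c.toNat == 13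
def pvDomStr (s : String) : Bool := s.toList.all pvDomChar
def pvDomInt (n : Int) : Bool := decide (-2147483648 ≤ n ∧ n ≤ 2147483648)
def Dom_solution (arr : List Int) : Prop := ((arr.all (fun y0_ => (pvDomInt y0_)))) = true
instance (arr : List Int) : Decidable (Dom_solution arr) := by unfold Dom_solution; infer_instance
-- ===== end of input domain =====

-- B replaces A's greedy while-loop per element by the closed form d//5 + (d%5)//2 + (d%5)%2 (faster: O(n) vs O(n*maxdiff)).

-- ===== PORT A =====
-- while diff > 0: greedy subtract 5 / 2 / 1, counting moves (A's `moves` with its `count` accumulator)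
def movesLoop (diff count : Int) : Int :=
  if h : diff > 0 then
    if diff ≥ 5 then movesLoop (diff - 5) (count + 1)
    else if diff ≥ 2 then movesLoop (diff - 2) (count + 1)
    else movesLoop (diff - 1) (count + 1)
  else count
termination_by diff.toNat
decreasing_by all_goals omega

def solution (arr : List Int) : Int :=
  match PySem.List.min? arr (fun x => x) with
  | none => 0   -- unreachable under Pre_solution: Python's min raises there
  | some m => arr.foldl (fun count i => if i == m then count else count + movesLoop (i - m) 0) 0

-- ===== PORT B =====
def closedMoves (d : Int) : Int :=
  PySem.Int.floordiv d 5 + PySem.Int.floordiv (PySem.Int.mod d 5) 2 + PySem.Int.mod (PySem.Int.mod d 5) 2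

def solution_alt (arr : List Int) : Int :=
  match PySem.List.min? arr (fun x => x) with
  | none => 0   -- unreachable under Pre_solution
  | some m => arr.foldl (fun total i => total + closedMoves (i - m)) 0

-- ===== PRECONDITION & SPEC =====
-- Pre_ excludes the empty list: there Python's min raises ValueError, so A (and B) raise.
def Pre_solution (arr : List Int) : Prop := arr ≠ []
instance (arr : List Int) : Decidable (Pre_solution arr) := by unfold Pre_solution; infer_instance
def pvWitness_solution : List Int := ([2, 2, 3, 7])

def Spec_solution (arr : List Int) (out : Int) : Prop := out = solution_alt arr
instance (arr : List Int) (out : Int) : Decidable (Spec_solution arr out) := by unfold Spec_solution; infer_instance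

-- ===== CLAIM (what is proved, stated in full; the proofs are below) =====
def Claim_equal_solution : Prop := ∀ (arr : List Int), Dom_solution arr → Pre_solution arr → Spec_solution arr (solution arr)

-- ===== LEMMAS AND PROOFS =====

theorem movesLoop_closed (n : Nat) : ∀ c : Int, movesLoop (n : Int) c = c + closedMoves (n : Int) := by
  induction n using Nat.strong_induction_on with
  | _ n ih =>
    intro c
    unfold movesLoop closedMoves
    rw [PySem.Int.floordiv_eq_ediv_of_pos (by omega), PySem.Int.mod_eq_emod_of_pos (by omega),
        PySem.Int.floordiv_eq_ediv_of_pos (by omega), PySem.Int.mod_eq_emod_of_pos (by omega)]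
    by_cases h0 : (n : Int) > 0
    · simp only [h0, dite_true]
      by_cases h5 : (n : Int) ≥ 5
      · have hn : ((n - 5 : Nat) : Int) = (n : Int) - 5 := by omega
        rw [if_pos h5, ← hn, ih (n - 5) (by omega), closedMoves,
            PySem.Int.floordiv_eq_ediv_of_pos (by omega), PySem.Int.mod_eq_emod_of_pos (by omega),
            PySem.Int.floordiv_eq_ediv_of_pos (by omega), PySem.Int.mod_eq_emod_of_pos (by omega), hn]
        omega
      · by_cases h2 : (n : Int) ≥ 2
        · have hn : ((n - 2 : Nat) : Int) = (n : Int) - 2 := by omega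
          rw [if_neg h5, if_pos h2, ← hn, ih (n - 2) (by omega), closedMoves,
              PySem.Int.floordiv_eq_ediv_of_pos (by omega), PySem.Int.mod_eq_emod_of_pos (by omega),
              PySem.Int.floordiv_eq_ediv_of_pos (by omega), PySem.Int.mod_eq_emod_of_pos (by omega), hn]
          omega
        · have hn : ((n - 1 : Nat) : Int) = (n : Int) - 1 := by omega
          rw [if_neg h5, if_neg h2, ← hn, ih (n - 1) (by omega), closedMoves,
              PySem.Int.floordiv_eq_ediv_of_pos (by omega), PySem.Int.mod_eq_emod_of_pos (by omega),
              PySem.Int.floordiv_eq_ediv_of_pos (by omega), PySem.Int.mod_eq_emod_of_pos (by omega), hn]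
          omega
    · simp only [h0, dite_false]
      omega

theorem step_eq (m i : Int) (h : m ≤ i) :
    (if i == m then (0 : Int) else movesLoop (i - m) 0) = closedMoves (i - m) := by
  by_cases he : i = m
  · rw [if_pos (by simpa using he), he]
    simp [closedMoves]
  · have hd : i - m = ((i - m).toNat : Int) := by omega
    rw [if_neg (by simpa using he), hd, movesLoop_closed]
    omega

theorem fold_eq (m : Int) (l : List Int) (hmin : ∀ x ∈ l, m ≤ x) : ∀ c : Int,
    l.foldl (fun count i => if i == m then count else count + movesLoop (i - m) 0) c =
    l.foldl (fun total i => total + closedMoves (i - m)) c := by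
  induction l with
  | nil => intro c; rfl
  | cons a t ih =>
    intro c
    simp only [List.foldl_cons]
    have ha : m ≤ a := hmin a (by simp)
    have hs := step_eq m a ha
    have hstep : (if a == m then c else c + movesLoop (a - m) 0) = c + closedMoves (a - m) := by
      by_cases he : a = m
      · rw [if_pos (by simpa using he)]
        rw [if_pos (by simpa using he)] at hs
        omega
      · rw [if_neg (by simpa using he)]
        rw [if_neg (by simpa using he)] at hs
        omega
    rw [hstep, ih (fun x hx => hmin x (by simp [hx]))]

-- ===== VERDICT (by name: the statement is the Claim_ definition above) =====
theorem solution_spec : Claim_equal_solution := by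
  intro arr _ hpre
  unfold Spec_solution solution solution_alt
  cases hmin : PySem.List.min? arr (fun x => x) with
  | none => rfl
  | some m =>
    exact fold_eq m arr (fun x hx => PySem.List.min?_isMin hmin x hx) 0
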